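-- pv_equiv track=rewrite | github.com/oohwooh/backup-to-paper | decode.py | only_consecutive
-- ===== SOURCE A (Python) =====
-- def only_consecutive(data, n):
--     out = set()
--     run = set()
--     if isinstance(data, set):
--         data = tuple(data)
--     for n1,n2 in zip(data, data[1:]): # compare consecutive numbers
--         if n2 == n1+1: # consecutive
--             run.add(n1)
--             run.add(n2)
--         else: # non-consecutive
--             if len(run) >= n:
--                 [out.add(m) for m in run]
--             run = set()
--     if len(run) >= n:
--         [out.add(m) for m in run]
--     if not out:
--         return data
--     return out
-- ===== SOURCE B (Python) =====
-- def only_consecutive(data, n):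
--     if isinstance(data, set):
--         data = tuple(data)
--     L = len(data)
--     m = max(n, 2)
--     # fwd[i]: length of the consecutive run starting at index i
--     fwd = [1] * L
--     for i in reversed(range(L - 1)):
--         if data[i + 1] == data[i] + 1:
--             fwd[i] = fwd[i + 1] + 1
--     # bwd[i]: length of the consecutive run ending at index i
--     bwd = [1] * L
--     for i in range(1, L):
--         if data[i] == data[i - 1] + 1:
--             bwd[i] = bwd[i - 1] + 1
--     out = set()
--     for v, f, g in zip(data, fwd, bwd):
--         if f + g - 1 >= m:  # total length of the run containing this element
--             out.add(v)
--     return out if out else data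
-- ===== Notes on version B (the rewrite author's own statement) =====
-- stated objective: alternative
-- what changed: B replaces A's streaming run-set accumulation with a per-index dynamic program: two arrays of forward/backward consecutive-run lengths are computed, and each element is kept by a pointwise threshold test fwd[i]+bwd[i]-1 >= max(n,2), with no run set or flush logic at all.
import Mathlib
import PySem

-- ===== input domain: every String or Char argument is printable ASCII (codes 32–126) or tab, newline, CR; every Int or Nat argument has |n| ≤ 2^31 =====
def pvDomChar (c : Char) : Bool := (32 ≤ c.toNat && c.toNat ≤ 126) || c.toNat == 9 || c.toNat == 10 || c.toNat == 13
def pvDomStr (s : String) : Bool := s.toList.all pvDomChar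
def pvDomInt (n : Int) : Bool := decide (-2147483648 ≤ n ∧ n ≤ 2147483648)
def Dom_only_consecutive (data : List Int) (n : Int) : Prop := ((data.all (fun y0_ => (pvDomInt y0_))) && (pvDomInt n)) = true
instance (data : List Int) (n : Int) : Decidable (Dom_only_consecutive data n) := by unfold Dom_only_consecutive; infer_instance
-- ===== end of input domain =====

-- B replaces A's streaming run-set accumulation with a per-index dynamic program
-- (forward/backward run-length arrays plus a pointwise threshold test);
-- objective: alternative algorithm, same asymptotic cost.

-- ===== PORT A =====
-- A's loop body over zip(data, data[1:]) with state (out, run)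
def pvAStep (n : Int) (st : PySem.Set Int × PySem.Set Int) (p : Int × Int) :
    PySem.Set Int × PySem.Set Int :=
  if p.2 = p.1 + 1 then
    (st.1, PySem.Set.add (PySem.Set.add st.2 p.1) p.2)
  else
    if PySem.Set.len st.2 ≥ n then (PySem.Set.update st.1 st.2, PySem.Set.empty)
    else (st.1, PySem.Set.empty)

def only_consecutive (data : List Int) (n : Int) : List Int :=
  let st := (List.zip data (PySem.List.slice data (some 1) none)).foldl (pvAStep n)
      (PySem.Set.empty, PySem.Set.empty)
  let out := if PySem.Set.len st.2 ≥ n then PySem.Set.update st.1 st.2 else st.1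
  if out = [] then data else out

-- ===== PORT B =====
-- body of B's first loop (for i in reversed(range(L-1))): fwd[i] = fwd[i+1] + 1;
-- all indices are nonnegative and in range, so pyGetD/pySetD are exact
def pvFwdStep (data : List Int) (f : List Int) (i : Int) : List Int :=
  if PySem.List.pyGetD data (i + 1) 0 = PySem.List.pyGetD data i 0 + 1
  then PySem.List.pySetD f i (PySem.List.pyGetD f (i + 1) 0 + 1) else f

-- body of B's second loop (for i in range(1, L)): bwd[i] = bwd[i-1] + 1
def pvBwdStep (data : List Int) (f : List Int) (i : Int) : List Int :=
  if PySem.List.pyGetD data i 0 = PySem.List.pyGetD data (i - 1) 0 + 1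
  then PySem.List.pySetD f i (PySem.List.pyGetD f (i - 1) 0 + 1) else f

-- body of B's third loop over zip(data, fwd, bwd)
def pvOutStep (m : Int) (o : PySem.Set Int) (p : (Int × Int) × Int) : PySem.Set Int :=
  if p.1.2 + p.2 - 1 ≥ m then PySem.Set.add o p.1.1 else o

def only_consecutive_alt (data : List Int) (n : Int) : List Int :=
  let L : Int := data.length
  let m : Int := max n 2
  let fwd := ((PySem.List.pyRange 0 (L - 1) 1).reverse).foldl (pvFwdStep data)
      (List.replicate data.length 1)
  let bwd := (PySem.List.pyRange 1 L 1).foldl (pvBwdStep data)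
      (List.replicate data.length 1)
  let out := ((data.zip fwd).zip bwd).foldl (pvOutStep m) PySem.Set.empty
  if out = [] then data else out

-- ===== PRECONDITION & SPEC =====
def Spec_only_consecutive (data : List Int) (n : Int) (out : List Int) : Prop := out = only_consecutive_alt data n
instance (data : List Int) (n : Int) (out : List Int) : Decidable (Spec_only_consecutive data n out) := by unfold Spec_only_consecutive; infer_instance

-- ===== CLAIM (what is proved, stated in full; the proofs are below) =====
def Claim_equal_only_consecutive : Prop := ∀ (data : List Int) (n : Int), Dom_only_consecutive data n → Spec_only_consecutive data n (only_consecutive data n)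

-- ===== LEMMAS AND PROOFS =====

-- the common reference point: the maximal-run decomposition of the input, and the
-- fold that unions qualifying segments
def segsWith : List Int → Int → List Int → List (List Int)
  | cur, _, [] => [cur]
  | cur, x, v :: t => if v = x + 1 then segsWith (cur ++ [v]) v t else cur :: segsWith [v] v t

def pvFilt (n : Int) (o : PySem.Set Int) (s : List Int) : PySem.Set Int :=
  if (s.length : Int) ≥ max n 2 then PySem.Set.update o s else o

-- ---- A-side: A's scan equals the segment fold ----

-- A's run set at any point is the current segment cur when |cur| >= 2, else empty
def pvRunOf (cur : List Int) : PySem.Set Int := if 2 ≤ cur.length then cur else []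

-- A's final flush after the loop
def pvAFinish (n : Int) (st : PySem.Set Int × PySem.Set Int) : PySem.Set Int :=
  if PySem.Set.len st.2 ≥ n then PySem.Set.update st.1 st.2 else st.1

lemma pvFlush_eq (n : Int) (out : PySem.Set Int) (cur : List Int) (hne : cur ≠ []) :
    pvAFinish n (out, pvRunOf cur) = pvFilt n out cur := by
  unfold pvAFinish pvRunOf pvFilt PySem.Set.len
  by_cases h2 : 2 ≤ cur.length
  · rw [if_pos h2]
    by_cases hn : (cur.length : Int) ≥ n
    · rw [if_pos hn, if_pos (by omega : (cur.length : Int) ≥ max n 2)]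
    · rw [if_neg hn, if_neg (by omega : ¬ (cur.length : Int) ≥ max n 2)]
  · have h1 : cur.length = 1 := by
      cases cur with
      | nil => exact absurd rfl hne
      | cons a t => simp at h2 ⊢; omega
    rw [if_neg h2, if_neg (by omega : ¬ (cur.length : Int) ≥ max n 2)]
    split_ifs with h
    · exact PySem.Set.update_nil out
    · rfl

lemma pvMainA (n : Int) (xs : List Int) : ∀ (x : Int) (out : PySem.Set Int) (cur : List Int),
    cur ≠ [] → cur.getLast? = some x → (∀ y ∈ cur, y ≤ x) →
    pvAFinish n ((List.zip (x :: xs) xs).foldl (pvAStep n) (out, pvRunOf cur))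
      = (segsWith cur x xs).foldl (pvFilt n) out := by
  induction xs with
  | nil =>
    intro x out cur hne _ _
    simp only [List.zip_nil_right, List.foldl_nil, segsWith, List.foldl_cons, List.foldl_nil]
    exact pvFlush_eq n out cur hne
  | cons v vs ih =>
    intro x out cur hne hlast hle
    have hxcur : x ∈ cur := List.mem_of_getLast? hlast
    have hzip : List.zip (x :: v :: vs) (v :: vs) = (x, v) :: List.zip (v :: vs) vs := by simp
    rw [hzip]
    simp only [List.foldl_cons]
    by_cases hc : v = x + 1
    · -- consecutive pair: the run becomes cur ++ [v]
      have h2' : 2 ≤ (cur ++ [v]).length := by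
        cases cur with
        | nil => exact absurd rfl hne
        | cons a t => simp
      have hrun : pvAStep n (out, pvRunOf cur) (x, v) = (out, pvRunOf (cur ++ [v])) := by
        simp only [pvAStep, if_pos hc, pvRunOf, if_pos h2']
        by_cases h2 : 2 ≤ cur.length
        · have hvnot : v ∉ cur := fun hv => by have := hle v hv; omega
          rw [if_pos h2, PySem.Set.add_of_mem hxcur, PySem.Set.add_of_not_mem hvnot]
        · have h1 : cur = [x] := by
            cases cur with
            | nil => exact absurd rfl hne
            | cons a t =>
              cases t with
              | nil => simp at hlast; rw [hlast]
              | cons b t2 => simp at h2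
          subst h1
          rw [if_neg h2,
            PySem.Set.add_of_not_mem (List.not_mem_nil (a := x)),
            PySem.Set.add_of_not_mem (by simp; omega : v ∉ ([] : List Int) ++ [x])]
          simp
      have happ : ∀ y ∈ cur ++ [v], y ≤ v := by
        intro y hy
        rcases List.mem_append.mp hy with h | h
        · have := hle y h; omega
        · simp at h; omega
      rw [hrun]
      have h := ih v out (cur ++ [v]) (by simp) List.getLast?_concat happ
      rw [h]
      simp only [segsWith, if_pos hc]
    · -- non-consecutive pair: flush the run, start segment [v]
      have hflush : pvAStep n (out, pvRunOf cur) (x, v) = (pvFilt n out cur, pvRunOf [v]) := by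
        have hr1 : pvRunOf [v] = ([] : List Int) := by simp [pvRunOf]
        rw [hr1]
        have hfe := pvFlush_eq n out cur hne
        simp only [pvAStep, if_neg hc]
        rw [← hfe]
        unfold pvAFinish
        split_ifs <;> simp [PySem.Set.empty]
      rw [hflush]
      have h := ih v (pvFilt n out cur) [v] (by simp) (by simp)
        (by intro y hy; simp at hy; omega)
      rw [h]
      simp only [segsWith, if_neg hc, List.foldl_cons]

-- ---- B-side: the run-length arrays ----

-- forward run lengths, structurally
def pvF : List Int → List Int
  | [] => []
  | [_] => [1]
  | a :: b :: t => (if b = a + 1 then (pvF (b :: t)).getD 0 0 + 1 else 1) :: pvF (b :: t)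

-- backward run lengths: pvBAux x k l = lengths for l, given previous value x with run length k
def pvBAux : Int → Int → List Int → List Int
  | _, _, [] => []
  | x, k, v :: t => (if v = x + 1 then k + 1 else 1) :: pvBAux v (if v = x + 1 then k + 1 else 1) t

def pvB : List Int → List Int
  | [] => []
  | d :: t => 1 :: pvBAux d 1 t

def descFrom : Nat → List Int
  | 0 => []
  | k + 1 => ((k : Int) + 1) :: descFrom k

def ascFrom : Int → Nat → List Int
  | _, 0 => []
  | k, j + 1 => (k + 1) :: ascFrom (k + 1) j

lemma pvF_length (l : List Int) : (pvF l).length = l.length := by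
  induction l with
  | nil => rfl
  | cons a t ih =>
    cases t with
    | nil => rfl
    | cons b t' => simp only [pvF, List.length_cons] at ih ⊢; omega

lemma pvBAux_length (x k : Int) (l : List Int) : (pvBAux x k l).length = l.length := by
  induction l generalizing x k with
  | nil => rfl
  | cons v t ih => simp [pvBAux, ih]

lemma pvB_length (l : List Int) : (pvB l).length = l.length := by
  cases l with
  | nil => rfl
  | cons d t => simp [pvB, pvBAux_length]

lemma descFrom_length (k : Nat) : (descFrom k).length = k := by
  induction k with
  | zero => rfl
  | succ k ih => simp [descFrom, ih]

lemma ascFrom_length (k : Int) (j : Nat) : (ascFrom k j).length = j := by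
  induction j generalizing k with
  | zero => rfl
  | succ j ih => simp [ascFrom, ih]

-- the recurrence the port's first loop implements
lemma pvF_getD (l : List Int) : ∀ i : Nat, i < l.length →
    (pvF l).getD i 0 =
      if i + 1 < l.length ∧ l.getD (i + 1) 0 = l.getD i 0 + 1
      then (pvF l).getD (i + 1) 0 + 1 else 1 := by
  induction l with
  | nil => intro i h; simp at h
  | cons a t ih =>
    cases t with
    | nil =>
      intro i h
      have hi : i = 0 := by simpa using h
      subst hi
      simp [pvF]
    | cons b t' =>
      intro i h
      match i with
      | 0 =>
        have hlt : 0 + 1 < (a :: b :: t').length := by simp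
        by_cases hb : b = a + 1
        · rw [if_pos ⟨hlt, by simpa using hb⟩]
          simp [pvF, hb]
        · rw [if_neg (by simp [hb])]
          simp [pvF, hb]
      | j + 1 =>
        have hj : j < (b :: t').length := by simpa using h
        have := ih j hj
        simp only [pvF, List.getD_cons_succ, List.length_cons] at this ⊢
        rw [this]
        by_cases hP : t'.getD j 0 = (b :: t').getD j 0 + 1
        · by_cases hA : j + 1 < t'.length + 1
          · rw [if_pos ⟨hA, hP⟩, if_pos ⟨by omega, hP⟩]
          · rw [if_neg (fun hc => hA (by omega)), if_neg (fun hc => hA (by omega))]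
        · rw [if_neg (fun hc => hP hc.2), if_neg (fun hc => hP hc.2)]


lemma pvBAux_getD_zero (x k v : Int) (t : List Int) :
    (pvBAux x k (v :: t)).getD 0 0 = if v = x + 1 then k + 1 else 1 := by
  simp [pvBAux]

lemma pvBAux_getD (t : List Int) : ∀ (x k : Int) (i : Nat), i + 1 < t.length →
    (pvBAux x k t).getD (i + 1) 0 =
      if t.getD (i + 1) 0 = t.getD i 0 + 1 then (pvBAux x k t).getD i 0 + 1 else 1 := by
  induction t with
  | nil => intro x k i h; simp at h
  | cons v t' ih =>
    intro x k i h
    match i with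
    | 0 =>
      cases t' with
      | nil => simp at h
      | cons w t'' =>
        simp only [pvBAux, List.getD_cons_succ, List.getD_cons_zero]
    | j + 1 =>
      have hj : j + 1 < t'.length := by simpa using h
      simp only [pvBAux, List.getD_cons_succ]
      exact ih v _ j hj

-- the recurrence the port's second loop implements
lemma pvB_getD (l : List Int) : ∀ i : Nat, i + 1 < l.length →
    (pvB l).getD (i + 1) 0 =
      if l.getD (i + 1) 0 = l.getD i 0 + 1 then (pvB l).getD i 0 + 1 else 1 := by
  cases l with
  | nil => intro i h; simp at h
  | cons d t =>
    intro i h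
    match i with
    | 0 =>
      cases t with
      | nil => simp at h
      | cons w t'' =>
        simp only [pvB, List.getD_cons_succ, List.getD_cons_zero]
        rw [pvBAux_getD_zero]
    | j + 1 =>
      have hj : j + 1 < t.length := by simpa using h
      simp only [pvB, List.getD_cons_succ]
      exact pvBAux_getD t d 1 j hj

lemma pvFwdStep_state (data : List Int) (m : Nat) (hm : m + 2 ≤ data.length) :
    pvFwdStep data (List.replicate (m + 1) 1 ++ (pvF data).drop (m + 1)) (m : Int)
      = List.replicate m 1 ++ (pvF data).drop m := by
  have hF : (pvF data).length = data.length := pvF_length data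
  have hm1 : m + 1 < data.length := by omega
  have hm0 : m < data.length := by omega
  have hs : List.replicate (m + 1) (1 : Int) ++ (pvF data).drop (m + 1)
      = List.replicate m 1 ++ (1 :: (pvF data).drop (m + 1)) := by
    rw [List.replicate_succ']; simp
  have hdrop : (pvF data).drop m = (pvF data).getD m 0 :: (pvF data).drop (m + 1) := by
    rw [List.drop_eq_getElem_cons (by omega), List.getD_eq_getElem _ _ (by omega)]
  have hget1 : (List.replicate (m + 1) (1 : Int) ++ (pvF data).drop (m + 1)).getD (m + 1) 0
      = (pvF data).getD (m + 1) 0 := by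
    rw [List.getD_append_right _ _ _ _ (by simp)]
    simp only [List.length_replicate, Nat.sub_self]
    rw [List.getD_eq_getElem _ _ (by simp; omega), List.getD_eq_getElem _ _ (by omega)]
    simp [List.getElem_drop]
  have hrec := pvF_getD data m hm0
  unfold pvFwdStep
  have c1 : ((m : Int) + 1) = ((m + 1 : Nat) : Int) := by push_cast; ring
  rw [c1]
  simp only [PySem.List.pyGetD_natCast, PySem.List.pySetD_natCast]
  by_cases hc : data.getD (m + 1) 0 = data.getD m 0 + 1
  · rw [if_pos hc]
    rw [hget1, hs, List.set_append, if_neg (by simp)]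
    simp only [List.length_replicate, Nat.sub_self, List.set_cons_zero]
    rw [hdrop, hrec, if_pos ⟨hm1, hc⟩]
  · rw [if_neg hc, hs, hdrop, hrec, if_neg (fun hx => hc hx.2)]

lemma pvFwd_loop (data : List Int) : ∀ m : Nat, m + 1 ≤ data.length →
    ((List.range m).reverse).foldl (fun f (k : Nat) => pvFwdStep data f (k : Int))
      (List.replicate m 1 ++ (pvF data).drop m) = pvF data := by
  intro m
  induction m with
  | zero => intro _; simp
  | succ m ih =>
    intro h
    rw [List.range_succ, List.reverse_append]
    simp only [List.reverse_cons, List.reverse_nil, List.nil_append, List.singleton_append,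
      List.foldl_cons]
    rw [pvFwdStep_state data m (by omega)]
    exact ih (by omega)

-- the first loop of the port computes pvF
lemma pvFwd_eq (data : List Int) :
    ((PySem.List.pyRange 0 ((data.length : Int) - 1) 1).reverse).foldl (pvFwdStep data)
      (List.replicate data.length 1) = pvF data := by
  cases data with
  | nil =>
    have h0 : ((([] : List Int).length : Int) - 1) = -1 := by simp
    rw [h0, PySem.List.pyRange_one_eq_nil (by omega)]
    rfl
  | cons d t =>
    have hlen : (d :: t).length = t.length + 1 := by simp
    have hr : PySem.List.pyRange 0 (((d :: t).length : Int) - 1) 1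
        = (List.range t.length).map (fun k => ((k : Nat) : Int)) := by
      rw [PySem.List.pyRange_one]
      have h1 : ((((d :: t).length : Int)) - 1 - 0).toNat = t.length := by simp
      rw [h1]
      exact List.map_congr_left (fun k _ => by simp)
    rw [hr, ← List.map_reverse, List.foldl_map]
    have hinit : List.replicate (d :: t).length (1 : Int)
        = List.replicate t.length 1 ++ (pvF (d :: t)).drop t.length := by
      have hF : (pvF (d :: t)).length = t.length + 1 := by rw [pvF_length]; simp
      have hlast : (pvF (d :: t)).getD t.length 0 = 1 := by
        rw [pvF_getD (d :: t) t.length (by simp)]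
        exact if_neg (fun hx => absurd hx.1 (by simp))
      have : (pvF (d :: t)).drop t.length
          = (pvF (d :: t)).getD t.length 0 :: (pvF (d :: t)).drop (t.length + 1) := by
        rw [List.drop_eq_getElem_cons (by omega), List.getD_eq_getElem _ _ (by omega)]
      rw [this, hlast, List.drop_of_length_le (by omega), hlen, List.replicate_succ']
    rw [hinit]
    exact pvFwd_loop (d :: t) t.length (by simp)

lemma pvBwdStep_state (data : List Int) (m : Nat) (hm : m + 2 ≤ data.length) :
    pvBwdStep data ((pvB data).take (m + 1) ++ List.replicate (data.length - (m + 1)) 1)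
        (((m + 1 : Nat) : Int))
      = (pvB data).take (m + 2) ++ List.replicate (data.length - (m + 2)) 1 := by
  have hB : (pvB data).length = data.length := pvB_length data
  have hm1 : m + 1 < data.length := by omega
  have htk : ((pvB data).take (m + 1)).length = m + 1 := by
    rw [List.length_take]; omega
  have hget : ((pvB data).take (m + 1) ++ List.replicate (data.length - (m + 1)) (1 : Int)).getD m 0
      = (pvB data).getD m 0 := by
    rw [List.getD_append _ _ _ _ (by omega)]
    rw [List.getD_eq_getElem _ _ (by omega), List.getElem_take,
      List.getD_eq_getElem _ _ (by omega)]
  have hrep : List.replicate (data.length - (m + 1)) (1 : Int)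
      = 1 :: List.replicate (data.length - (m + 2)) 1 := by
    have h : data.length - (m + 1) = (data.length - (m + 2)) + 1 := by omega
    rw [h, List.replicate_succ]
  have htake : (pvB data).take (m + 2) = (pvB data).take (m + 1) ++ [(pvB data).getD (m + 1) 0] := by
    rw [List.take_add_one]
    congr 1
    rw [List.getElem?_eq_getElem (by omega), List.getD_eq_getElem _ _ (by omega)]
    rfl
  have hrec := pvB_getD data m hm1
  unfold pvBwdStep
  have c1 : (((m + 1 : Nat) : Int)) - 1 = ((m : Nat) : Int) := by push_cast; ring
  rw [c1]
  simp only [PySem.List.pyGetD_natCast, PySem.List.pySetD_natCast]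
  by_cases hc : data.getD (m + 1) 0 = data.getD m 0 + 1
  · rw [if_pos hc, hget, List.set_append, if_neg (by omega)]
    rw [htk, Nat.sub_self, hrep, List.set_cons_zero, htake, hrec, if_pos hc]
    simp
  · rw [if_neg hc, htake, hrec, if_neg hc, hrep]
    simp

lemma pvBwd_loop (data : List Int) : ∀ m : Nat, m + 1 ≤ data.length →
    (List.range m).foldl (fun f (k : Nat) => pvBwdStep data f (1 + (k : Int)))
        (List.replicate data.length 1)
      = (pvB data).take (m + 1) ++ List.replicate (data.length - (m + 1)) 1 := by
  intro m
  induction m with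
  | zero =>
    intro h
    cases data with
    | nil => simp at h
    | cons d t =>
      simp only [List.range_zero, List.foldl_nil, pvB]
      rw [List.take_succ_cons, List.take_zero]
      simp [List.replicate_succ]
  | succ m ih =>
    intro h
    rw [List.range_succ, List.foldl_append, ih (by omega)]
    simp only [List.foldl_cons, List.foldl_nil]
    have c1 : (1 : Int) + (m : Int) = ((m + 1 : Nat) : Int) := by push_cast; ring
    rw [c1, pvBwdStep_state data m (by omega)]

-- the second loop of the port computes pvB
lemma pvBwd_eq (data : List Int) :
    (PySem.List.pyRange 1 (data.length : Int) 1).foldl (pvBwdStep data)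
      (List.replicate data.length 1) = pvB data := by
  cases data with
  | nil =>
    rw [PySem.List.pyRange_one_eq_nil (by simp)]
    rfl
  | cons d t =>
    have hr : PySem.List.pyRange 1 ((d :: t).length : Int) 1
        = (List.range t.length).map (fun (k : Nat) => 1 + (k : Int)) := by
      rw [PySem.List.pyRange_one]
      have h1 : (((d :: t).length : Int) - 1).toNat = t.length := by simp
      rw [h1]
    rw [hr, List.foldl_map, pvBwd_loop (d :: t) t.length (by simp)]
    have hB : (pvB (d :: t)).length = t.length + 1 := by rw [pvB_length]; simp
    rw [List.take_of_length_le (by simp [hB])]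
    simp

-- ---- B-side: run-length arrays on a segment decomposition ----

lemma pvF_run (xs : List Int) : ∀ (cur : List Int) (x : Int),
    cur.getLast? = some x → List.IsChain (fun a b => b = a + 1) cur →
    (∀ v ∈ xs.head?, v ≠ x + 1) →
    pvF (cur ++ xs) = descFrom cur.length ++ pvF xs := by
  intro cur
  induction cur with
  | nil => intro x h; simp at h
  | cons c cs ih =>
    intro x hlast hchain hfresh
    cases cs with
    | nil =>
      have hx : c = x := by simpa using hlast
      subst hx
      cases xs with
      | nil => simp [pvF, descFrom]
      | cons v t =>
        have hv : ¬ v = c + 1 := hfresh v (by simp)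
        simp only [List.singleton_append, pvF, if_neg hv, descFrom, List.length_singleton]
        simp
    | cons c2 cs2 =>
      rw [List.isChain_cons] at hchain
      have hc2 : c2 = c + 1 := hchain.1 c2 (by simp)
      have hlast' : (c2 :: cs2).getLast? = some x := by
        rw [← hlast]; simp [List.getLast?_cons_cons]
      have hIH := ih x hlast' hchain.2 hfresh
      have hsplit : (c :: c2 :: cs2) ++ xs = c :: c2 :: (cs2 ++ xs) := by simp
      rw [hsplit]
      have hunf : pvF (c :: c2 :: (cs2 ++ xs))
          = (if c2 = c + 1 then (pvF (c2 :: (cs2 ++ xs))).getD 0 0 + 1 else 1)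
              :: pvF (c2 :: (cs2 ++ xs)) := rfl
      rw [hunf, if_pos hc2]
      have hIH' : pvF (c2 :: (cs2 ++ xs)) = descFrom (c2 :: cs2).length ++ pvF xs := by
        rw [← hIH]; rfl
      rw [hIH']
      have hhead : (descFrom (c2 :: cs2).length ++ pvF xs).getD 0 0 = ((cs2.length : Int) + 1) := by
        simp only [List.length_cons, descFrom]
        rfl
      rw [hhead]
      have hd : descFrom (c :: c2 :: cs2).length
          = (((cs2.length : Int) + 1) + 1) :: descFrom (c2 :: cs2).length := by
        simp only [List.length_cons, descFrom]
        norm_num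
      rw [hd]
      simp

lemma pvB_run (xs : List Int) : ∀ (cur : List Int) (x : Int),
    cur.getLast? = some x → List.IsChain (fun a b => b = a + 1) cur →
    (∀ v ∈ xs.head?, v ≠ x + 1) →
    pvB (cur ++ xs) = ascFrom 0 cur.length ++ pvB xs := by
  intro cur
  cases cur with
  | nil => intro x h; simp at h
  | cons c cs =>
    intro x hlast hchain hfresh
    have haux : ∀ (cs' : List Int) (p k : Int),
        List.IsChain (fun a b => b = a + 1) (p :: cs') → (p :: cs').getLast? = some x →
        pvBAux p k (cs' ++ xs) = ascFrom k cs'.length ++ pvB xs := by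
      intro cs'
      induction cs' with
      | nil =>
        intro p k _ hl
        have hp : p = x := by simpa using hl
        subst hp
        cases xs with
        | nil => simp [pvBAux, ascFrom, pvB]
        | cons v t =>
          have hv : ¬ v = p + 1 := hfresh v (by simp)
          simp [pvBAux, ascFrom, pvB, hv]
      | cons c1 cs1 ihh =>
        intro p k hch hl
        rw [List.isChain_cons] at hch
        have hc1 : c1 = p + 1 := hch.1 c1 (by simp)
        have hl' : (c1 :: cs1).getLast? = some x := by
          rw [← hl]; simp [List.getLast?_cons_cons]
        have := ihh c1 (k + 1) hch.2 hl'
        simp only [List.cons_append, pvBAux, if_pos hc1, List.length_cons, ascFrom]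
        rw [this]
    have hch' : List.IsChain (fun a b => b = a + 1) (c :: cs) := hchain
    simp only [List.cons_append, pvB, List.length_cons, ascFrom]
    rw [haux cs c 1 hch' hlast]
    norm_num
    cases xs <;> rfl

-- folding B's threshold step over one segment is the segment filter
lemma pvSeg_fold (m : Int) : ∀ (cur : List Int) (k : Int) (out : PySem.Set Int),
    ((cur.zip (descFrom cur.length)).zip (ascFrom k cur.length)).foldl (pvOutStep m) out
      = if (cur.length : Int) + k ≥ m then PySem.Set.update out cur else out := by
  intro cur
  induction cur with
  | nil =>
    intro k out
    simp only [List.length_nil, descFrom, ascFrom, List.zip_nil_left, List.foldl_nil,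
      Nat.cast_zero, zero_add]
    split_ifs with h
    · exact (PySem.Set.update_nil out).symm
    · rfl
  | cons c cs ih =>
    intro k out
    simp only [List.length_cons, descFrom, ascFrom, List.zip_cons_cons, List.foldl_cons]
    have hstep : pvOutStep m out (((c, (cs.length : Int) + 1)), k + 1)
        = if ((cs.length : Int) + 1 + k ≥ m) then PySem.Set.add out c else out := by
      unfold pvOutStep
      by_cases h : (cs.length : Int) + 1 + k ≥ m
      · rw [if_pos h, if_pos (by push_cast; omega)]
      · rw [if_neg (by push_cast; omega), if_neg h]
    rw [hstep]
    by_cases h : (cs.length : Int) + 1 + k ≥ m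
    · rw [if_pos h, ih (k + 1) (PySem.Set.add out c),
        if_pos (by omega), if_pos (by omega)]
      simp [PySem.Set.update]
    · rw [if_neg h, ih (k + 1) out,
        if_neg (by omega), if_neg (by omega)]

-- B's zip fold equals the segment fold
lemma pvMainB (n : Int) (xs : List Int) : ∀ (cur : List Int) (x : Int) (out : PySem.Set Int),
    cur ≠ [] → cur.getLast? = some x → List.IsChain (fun a b => b = a + 1) cur →
    ((((cur ++ xs).zip (pvF (cur ++ xs))).zip (pvB (cur ++ xs))).foldl (pvOutStep (max n 2)) out)
      = (segsWith cur x xs).foldl (pvFilt n) out := by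
  induction xs with
  | nil =>
    intro cur x out hne hlast hchain
    have hF := pvF_run [] cur x hlast hchain (by simp)
    have hB := pvB_run [] cur x hlast hchain (by simp)
    simp only [List.append_nil] at hF hB
    simp only [List.append_nil]
    rw [hF, hB]
    simp only [pvF, pvB, List.append_nil]
    rw [pvSeg_fold (max n 2) cur 0 out]
    simp only [segsWith, List.foldl_cons, List.foldl_nil, pvFilt, add_zero]
  | cons v t ih =>
    intro cur x out hne hlast hchain
    by_cases hc : v = x + 1
    · have hsplit : cur ++ v :: t = (cur ++ [v]) ++ t := by simp
      have hchain' : List.IsChain (fun a b => b = a + 1) (cur ++ [v]) :=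
        List.isChain_append.2 ⟨hchain, List.isChain_singleton v,
          fun a ha b hb => by
            rw [hlast] at ha
            simp at ha hb
            omega⟩
      have hlast' : (cur ++ [v]).getLast? = some v := List.getLast?_concat
      rw [hsplit, ih (cur ++ [v]) v out (by simp) hlast' hchain']
      simp only [segsWith, if_pos hc]
    · have hfresh : ∀ w ∈ (v :: t).head?, w ≠ x + 1 := by
        intro w hw; simp at hw; omega
      have hF := pvF_run (v :: t) cur x hlast hchain hfresh
      have hB := pvB_run (v :: t) cur x hlast hchain hfresh
      rw [hF, hB,
        List.zip_append (by rw [descFrom_length]),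
        List.zip_append (by rw [List.length_zip, descFrom_length, ascFrom_length]; simp),
        List.foldl_append, pvSeg_fold (max n 2) cur 0 out]
      have hfil : (if (cur.length : Int) + 0 ≥ max n 2 then PySem.Set.update out cur else out)
          = pvFilt n out cur := by
        simp [pvFilt]
      have hi := ih [v] v (pvFilt n out cur) (by simp) (by simp) (List.isChain_singleton v)
      simp only [List.singleton_append] at hi
      rw [hfil, hi]
      simp only [segsWith, if_neg hc, List.foldl_cons]

theorem only_consecutive_equal (data : List Int) (n : Int) :
    only_consecutive data n = only_consecutive_alt data n := by
  cases data with
  | nil =>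
    simp only [only_consecutive, only_consecutive_alt, PySem.List.slice_from_one]
    simp [PySem.Set.len, PySem.Set.empty, PySem.Set.update_nil, PySem.List.pyRange_one_eq_nil]
  | cons d0 rest =>
    simp only [only_consecutive, only_consecutive_alt, PySem.List.slice_from_one, List.tail_cons]
    have hmain := pvMainA n rest d0 PySem.Set.empty [d0] (by simp) (by simp) (by simp)
    have hrun : pvRunOf [d0] = ([] : PySem.Set Int) := by simp [pvRunOf]
    rw [hrun] at hmain
    unfold pvAFinish at hmain
    simp only [PySem.Set.empty] at hmain ⊢
    rw [hmain, pvFwd_eq (d0 :: rest), pvBwd_eq (d0 :: rest)]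
    have hb := pvMainB n rest [d0] d0 ([] : PySem.Set Int) (by simp) (by simp)
      (List.isChain_singleton d0)
    simp only [List.singleton_append] at hb
    rw [hb]

-- ===== VERDICT (by name: the statement is the Claim_ definition above) =====
theorem only_consecutive_spec : Claim_equal_only_consecutive := by
  intro data n _
  unfold Spec_only_consecutive
  exact only_consecutive_equal data n
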